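-- pv_equiv track=rewrite | github.com/Sanchitanwar0007/10X-Pyhton-and-Java-Code | Beautiful_String.py | count
-- ===== SOURCE A (Python) =====
-- def count(s):
--     c0=0
--     c1=0
--     c2=0
--     key=(c1-c0),"#",(c2-c1)
--     dict={}
--     dict[key]=1
--     ans=0
--     for i in s:
--         if(i=='a'):
--             c0+=1
--         elif(i=='b'):
--             c1+=1
--         elif(i=='c'):
--             c2+=1
--         key=(c1-c0),"#",(c2-c1)
--         if(key in dict):
--             ans+=dict[key]
--             dict[key]+=1
--         else:
--             dict[key]=1
--     return ans
-- ===== SOURCE B (Python) =====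
-- def count(s):
--     ans = 0
--     n = len(s)
--     for i in range(n):
--         ca = cb = cc = 0
--         for ch in s[i:]:
--             if ch == 'a':
--                 ca += 1
--             elif ch == 'b':
--                 cb += 1
--             elif ch == 'c':
--                 cc += 1
--             if ca == cb == cc:
--                 ans += 1
--     return ans
-- ===== Notes on version B (the rewrite author's own statement) =====
-- stated objective: simpler
-- what changed: Replaced the prefix-difference hashmap counting of equal keys by a plain nested loop that restarts per-start letter counters and counts every balanced substring directly.
import Mathlib
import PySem

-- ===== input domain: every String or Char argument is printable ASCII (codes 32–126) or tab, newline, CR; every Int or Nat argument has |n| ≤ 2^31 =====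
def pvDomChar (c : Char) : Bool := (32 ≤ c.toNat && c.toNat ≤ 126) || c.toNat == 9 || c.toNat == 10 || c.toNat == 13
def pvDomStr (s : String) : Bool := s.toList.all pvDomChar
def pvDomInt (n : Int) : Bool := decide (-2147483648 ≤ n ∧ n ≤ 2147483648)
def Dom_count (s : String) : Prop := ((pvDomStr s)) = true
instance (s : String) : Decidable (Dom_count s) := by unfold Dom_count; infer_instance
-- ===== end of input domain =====

-- B replaces A's prefix-difference hashmap by a plain nested loop counting balanced substrings directly (simpler, no dict).

-- ===== PORT A =====
-- the if/elif/elif counter update of A's loop body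
def countA_upd (c0 c1 c2 : Int) (i : Char) : Int × Int × Int :=
  if i = 'a' then (c0 + 1, c1, c2)
  else if i = 'b' then (c0, c1 + 1, c2)
  else if i = 'c' then (c0, c1, c2 + 1)
  else (c0, c1, c2)

-- the 'for i in s' loop; 'dict[key]' is read as getD key 0, sound since guarded by 'key in dict'
def countA_loop : List Char → Int → Int → Int → PySem.Dict (Int × String × Int) Int → Int → Int
  | [], _, _, _, _, ans => ans
  | i :: rest, c0, c1, c2, d, ans =>
    let u := countA_upd c0 c1 c2 i
    let c0 := u.1
    let c1 := u.2.1
    let c2 := u.2.2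
    let key : Int × String × Int := (c1 - c0, "#", c2 - c1)
    if d.contains key then
      let v := d.getD key 0
      countA_loop rest c0 c1 c2 (d.insert key (v + 1)) (ans + v)
    else
      countA_loop rest c0 c1 c2 (d.insert key 1) ans

def count (s : String) : Int :=
  countA_loop s.toList 0 0 0 (PySem.Dict.empty.insert ((0 : Int) - 0, "#", (0 : Int) - 0) 1) 0

-- ===== PORT B =====
-- 'for ch in s[i:]' with per-start counters ca,cb,cc
def countB_inner : List Char → Int → Int → Int → Int → Int
  | [], _, _, _, ans => ans
  | ch :: rest, ca, cb, cc, ans =>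
    let u := if ch = 'a' then (ca + 1, cb, cc)
      else if ch = 'b' then (ca, cb + 1, cc)
      else if ch = 'c' then (ca, cb, cc + 1)
      else (ca, cb, cc)
    countB_inner rest u.1 u.2.1 u.2.2 (if u.1 = u.2.1 ∧ u.2.1 = u.2.2 then ans + 1 else ans)

-- 'for i in range(n)': the suffix s[i:] is the current tail
def countB_outer : List Char → Int → Int
  | [], ans => ans
  | l@(_ :: rest), ans => countB_outer rest (countB_inner l 0 0 0 ans)

def count_alt (s : String) : Int := countB_outer s.toList 0

-- ===== PRECONDITION & SPEC =====
def Spec_count (s : String) (out : Int) : Prop := out = count_alt s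
instance (s : String) (out : Int) : Decidable (Spec_count s out) := by unfold Spec_count; infer_instance

-- ===== CLAIM (what is proved, stated in full; the proofs are below) =====
def Claim_equal_count : Prop := ∀ (s : String), Dom_count s → Spec_count s (count s)

-- ===== LEMMAS AND PROOFS =====

-- the key (c1-c0, c2-c1) of a prefix, updated per character
def step (k : Int × Int) (c : Char) : Int × Int :=
  if c = 'a' then (k.1 - 1, k.2)
  else if c = 'b' then (k.1 + 1, k.2 - 1)
  else if c = 'c' then (k.1, k.2 + 1)
  else k

-- keys of all nonempty prefixes, starting from key k
def tkeys : (Int × Int) → List Char → List (Int × Int)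
  | _, [] => []
  | k, c :: r => step k c :: tkeys (step k c) r

-- occurrences of target key t along the nonempty prefixes, starting from key k
def occ : List Char → (Int × Int) → (Int × Int) → Int
  | [], _, _ => 0
  | c :: r, k, t => (if step k c = t then 1 else 0) + occ r (step k c) t

def cnt (t : Int × Int) : List (Int × Int) → Int
  | [] => 0
  | k :: r => (if k = t then 1 else 0) + cnt t r

-- equal pairs grouped by smaller index
def pc : List (Int × Int) → Int
  | [] => 0
  | k :: r => cnt k r + pc r

def cross : List (Int × Int) → List (Int × Int) → Int
  | [], _ => 0
  | k :: p, ks => cnt k ks + cross p ks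

-- equal pairs grouped by larger index, against already-seen keys p
def pcA : List (Int × Int) → List (Int × Int) → Int
  | [], _ => 0
  | k :: r, p => cnt k p + pcA r (k :: p)

theorem upd_step (c0 c1 c2 : Int) (i : Char) :
    (((countA_upd c0 c1 c2 i).2.1 - (countA_upd c0 c1 c2 i).1,
      (countA_upd c0 c1 c2 i).2.2 - (countA_upd c0 c1 c2 i).2.1) : Int × Int)
      = step (c1 - c0, c2 - c1) i := by
  unfold countA_upd step
  split_ifs <;> simp [Prod.ext_iff] <;> omega

theorem step_shift (a b u v : Int) (c : Char) :
    step (a + u, b + v) c = ((step (a, b) c).1 + u, (step (a, b) c).2 + v) := by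
  unfold step; split_ifs <;> simp [Prod.ext_iff] <;> omega

theorem occ_shift (l : List Char) : ∀ (a b x y u v : Int),
    occ l (a + u, b + v) (x + u, y + v) = occ l (a, b) (x, y) := by
  induction l with
  | nil => intro a b x y u v; rfl
  | cons c r ih =>
    intro a b x y u v
    simp only [occ, step_shift]
    rw [show ((step (a, b) c).1 + u, (step (a, b) c).2 + v)
        = ((step (a, b) c).1 + u, (step (a, b) c).2 + v) from rfl]
    have h1 : (((step (a, b) c).1 + u, (step (a, b) c).2 + v) : Int × Int) = ((x + u, y + v) : Int × Int)
        ↔ step (a, b) c = (x, y) := by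
      constructor
      · intro h
        have h1 := congrArg Prod.fst h
        have h2 := congrArg Prod.snd h
        simp at h1 h2
        have : step (a, b) c = ((step (a,b) c).1, (step (a,b) c).2) := rfl
        rw [this, Prod.ext_iff]; simp; omega
      · intro h; rw [h]
    rw [if_congr h1 rfl rfl]
    have h2 : occ r ((step (a, b) c).1 + u, (step (a, b) c).2 + v) (x + u, y + v)
        = occ r ((step (a, b) c).1, (step (a, b) c).2) (x, y) := ih _ _ _ _ _ _
    rw [h2]

theorem occ_cnt (l : List Char) : ∀ (k t : Int × Int), occ l k t = cnt t (tkeys k l) := by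
  induction l with
  | nil => intro k t; rfl
  | cons c r ih => intro k t; simp only [occ, tkeys, cnt, ih]

theorem innerB_occ (l : List Char) : ∀ (ca cb cc ans : Int),
    countB_inner l ca cb cc ans = ans + occ l (cb - ca, cc - cb) (0, 0) := by
  induction l with
  | nil => intro ca cb cc ans; simp [countB_inner, occ]
  | cons c r ih =>
    intro ca cb cc ans
    by_cases h1 : c = 'a'
    · simp only [countB_inner, occ, step, if_pos h1]
      rw [ih]
      rw [show ((cb - (ca + 1) : Int), (cc - cb : Int)) = ((cb - ca - 1 : Int), (cc - cb : Int)) from by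
        simp [Prod.ext_iff]; ring]
      split_ifs <;> simp_all [Prod.ext_iff] <;> omega
    · by_cases h2 : c = 'b'
      · simp only [countB_inner, occ, step, if_pos h2, if_neg h1]
        rw [ih]
        rw [show ((cb + 1 - ca : Int), (cc - (cb + 1) : Int)) = ((cb - ca + 1 : Int), (cc - cb - 1 : Int)) from by
          simp [Prod.ext_iff]; constructor <;> ring]
        split_ifs <;> simp_all [Prod.ext_iff] <;> omega
      · by_cases h3 : c = 'c'
        · simp only [countB_inner, occ, step, if_pos h3, if_neg h1, if_neg h2]
          rw [ih]
          rw [show ((cb - ca : Int), (cc + 1 - cb : Int)) = ((cb - ca : Int), (cc - cb + 1 : Int)) from by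
            simp [Prod.ext_iff]; ring]
          split_ifs <;> simp_all [Prod.ext_iff] <;> omega
        · simp only [countB_inner, occ, step, if_neg h1, if_neg h2, if_neg h3]
          rw [ih]
          split_ifs <;> simp_all [Prod.ext_iff] <;> omega

theorem outer_pc (l : List Char) : ∀ (k0 : Int × Int) (ans : Int),
    countB_outer l ans = ans + pc (k0 :: tkeys k0 l) := by
  induction l with
  | nil => intro k0 ans; simp [countB_outer, pc, tkeys, cnt]
  | cons c r ih =>
    intro k0 ans
    simp only [countB_outer]
    rw [ih (step k0 c), innerB_occ]
    have hsh : occ (c :: r) (0 - 0, 0 - 0) (0, 0) = occ (c :: r) k0 k0 := by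
      have := occ_shift (c :: r) 0 0 0 0 k0.1 k0.2
      simp at this
      rw [show ((0:Int) - 0, (0:Int) - 0) = ((0:Int), (0:Int)) by norm_num, ← this]
    rw [hsh, occ_cnt]
    simp only [pc, tkeys]
    ring

theorem cross_cons_right (k : Int × Int) (r : List (Int × Int)) : ∀ (p : List (Int × Int)),
    cross p (k :: r) = cnt k p + cross p r := by
  intro p
  induction p with
  | nil => simp [cross, cnt]
  | cons k' p ih =>
    simp only [cross, cnt, ih]
    by_cases h : k = k'
    · subst h; simp; ring
    · rw [if_neg h, if_neg (fun hh => h hh.symm)]; ring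

theorem pcA_split (ks : List (Int × Int)) : ∀ (p : List (Int × Int)),
    pcA ks p = cross p ks + pc ks := by
  induction ks with
  | nil => intro p; simp only [pcA, pc]; induction p <;> simp_all [cross, cnt]
  | cons k r ih =>
    intro p
    simp only [pcA, pc, ih, cross, cross_cons_right]
    ring

-- dict invariant: the dict holds exactly the multiplicities of keys seen so far
def encInv (d : PySem.Dict (Int × String × Int) Int) (seen : List (Int × Int)) : Prop :=
  ∀ k : Int × Int, d.get? (k.1, "#", k.2) =
    if cnt k seen = 0 then none else some (cnt k seen)

theorem enc_inj {k j : Int × Int} (h : ((k.1, "#", k.2) : Int × String × Int) = (j.1, "#", j.2)) : k = j := by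
  rw [Prod.ext_iff]
  simp [Prod.ext_iff] at h
  exact h

theorem cnt_nonneg (t : Int × Int) (l : List (Int × Int)) : 0 ≤ cnt t l := by
  induction l with
  | nil => simp [cnt]
  | cons k r ih => simp only [cnt]; split_ifs <;> omega

theorem encInv_insert {d : PySem.Dict (Int × String × Int) Int} {seen : List (Int × Int)}
    (hInv : encInv d seen) (k' : Int × Int) :
    encInv (d.insert (k'.1, "#", k'.2) (cnt k' seen + 1)) (k' :: seen) := by
  intro k
  rw [PySem.Dict.get?_insert]
  by_cases hk : k = k'
  · subst hk
    rw [if_pos rfl]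
    have hnn := cnt_nonneg k seen
    have hcnt : cnt k (k :: seen) = 1 + cnt k seen := by simp [cnt]
    rw [hcnt, if_neg (by omega)]
    simp only [Option.some.injEq]
    omega
  · rw [if_neg (fun h => hk (enc_inj h))]
    simp only [cnt, if_neg (fun h : k' = k => hk h.symm)]
    simpa using hInv k

theorem Aloop_pcA (rest : List Char) :
    ∀ (c0 c1 c2 : Int) (d : PySem.Dict (Int × String × Int) Int) (ans : Int)
      (seen : List (Int × Int)), encInv d seen →
    countA_loop rest c0 c1 c2 d ans = ans + pcA (tkeys (c1 - c0, c2 - c1) rest) seen := by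
  induction rest with
  | nil => intro _ _ _ _ ans _ _; simp [countA_loop, tkeys, pcA]
  | cons i r ih =>
    intro c0 c1 c2 d ans seen hInv
    have hkey := upd_step c0 c1 c2 i
    rcases hu : countA_upd c0 c1 c2 i with ⟨a, b, c'⟩
    rw [hu] at hkey
    try dsimp only at hkey
    simp only [countA_loop, hu]
    try dsimp only
    rw [tkeys, ← hkey]
    simp only [pcA]
    have hget := hInv (b - a, c' - b)
    try dsimp only at hget
    by_cases hz : cnt ((b - a, c' - b) : Int × Int) seen = 0
    · rw [hz, if_pos rfl] at hget
      rw [if_neg (by rw [PySem.Dict.contains_eq_isSome_get?, hget]; simp)]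
      have hIns := encInv_insert hInv ((b - a, c' - b) : Int × Int)
      try dsimp only at hIns
      rw [hz] at hIns
      norm_num at hIns
      rw [ih a b c' _ ans _ hIns, hz]
      ring
    · rw [if_neg hz] at hget
      rw [if_pos (by rw [PySem.Dict.contains_eq_isSome_get?, hget]; simp)]
      rw [PySem.Dict.getD_eq_get?_getD, hget]
      simp only [Option.getD_some]
      have hIns := encInv_insert hInv ((b - a, c' - b) : Int × Int)
      try dsimp only at hIns
      rw [ih a b c' _ _ _ hIns]
      ring

theorem encInv_init : encInv (PySem.Dict.empty.insert ((0 : Int) - 0, "#", (0 : Int) - 0) 1) [((0 : Int), (0 : Int))] := by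
  intro k
  rw [PySem.Dict.get?_insert]
  by_cases hk : k = ((0 : Int), (0 : Int))
  · subst hk; simp [cnt]
  · rw [if_neg (by
      intro h
      exact hk (enc_inj (by simpa using h))), PySem.Dict.get?_empty]
    simp only [cnt, if_neg (fun h : ((0 : Int), (0 : Int)) = k => hk h.symm)]
    norm_num

-- ===== VERDICT (by name: the statement is the Claim_ definition above) =====
theorem count_spec : Claim_equal_count := by
  intro s _
  unfold Spec_count count count_alt
  rw [Aloop_pcA s.toList 0 0 0 _ 0 [((0 : Int), (0 : Int))] encInv_init]
  rw [pcA_split]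
  rw [outer_pc s.toList ((0 : Int), (0 : Int)) 0]
  simp only [cross, pc]
  norm_num
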